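-- pv_equiv track=rewrite | github.com/wanawin/DC5MiddayFull | dc5_trapv3_app_streamlit.py | filter_consecutive_digits
-- ===== SOURCE A (Python) =====
-- def filter_consecutive_digits(digits):
--     digits = sorted(set(digits))
--     max_seq = 1
--     current_seq = 1
--     for i in range(1, len(digits)):
--         if digits[i] == digits[i-1] + 1:
--             current_seq += 1
--             max_seq = max(max_seq, current_seq)
--         else:
--             current_seq = 1
--     return max_seq >= 4
-- ===== SOURCE B (Python) =====
-- def filter_consecutive_digits(digits):
--     s = set(digits)
--     return any(d + 1 in s and d + 2 in s and d + 3 in s for d in s)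
-- ===== Notes on version B (the rewrite author's own statement) =====
-- stated objective: faster
-- what changed: Replaces the sort-then-scan of adjacent neighbours by a single set-membership test: a run of length >= 4 exists iff some d has d+1, d+2, d+3 all in the set, so no sorting and no running max/current counters are needed.
import Mathlib
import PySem

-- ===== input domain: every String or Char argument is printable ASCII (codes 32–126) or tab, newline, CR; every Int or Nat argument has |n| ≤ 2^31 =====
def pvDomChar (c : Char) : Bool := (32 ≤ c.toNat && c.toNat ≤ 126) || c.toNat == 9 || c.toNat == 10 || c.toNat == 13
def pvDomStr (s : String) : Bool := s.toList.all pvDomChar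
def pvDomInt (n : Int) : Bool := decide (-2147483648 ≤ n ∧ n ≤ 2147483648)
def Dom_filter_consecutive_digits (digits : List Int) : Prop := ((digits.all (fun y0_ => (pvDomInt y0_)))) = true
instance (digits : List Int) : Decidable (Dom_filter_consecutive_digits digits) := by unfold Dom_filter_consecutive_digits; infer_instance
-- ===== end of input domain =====

-- B replaces A's sort-then-adjacent-scan by a single set-membership test (no sorting, no counters).

-- ===== PORT A =====
-- digits = sorted(set(digits)); then scan adjacent pairs keeping (max_seq, current_seq)
def filter_consecutive_digits (digits : List Int) : Bool :=
  let ds := PySem.List.sorted (PySem.Set.ofList digits) (fun x => x) false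
  let st := (PySem.List.pyRange 1 (PySem.List.len ds) 1).foldl
    (fun (st : Int × Int) i =>
      if PySem.List.pyGetD ds i 0 = PySem.List.pyGetD ds (i - 1) 0 + 1 then
        (max st.1 (st.2 + 1), st.2 + 1)
      else (st.1, 1)) (1, 1)
  decide (4 ≤ st.1)

-- ===== PORT B =====
-- s = set(digits); any(d+1 in s and d+2 in s and d+3 in s for d in s)
def filter_consecutive_digits_alt (digits : List Int) : Bool :=
  let s := PySem.Set.ofList digits
  s.any (fun d => PySem.Set.contains s (d + 1) && PySem.Set.contains s (d + 2) && PySem.Set.contains s (d + 3))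

-- ===== PRECONDITION & SPEC =====
def Spec_filter_consecutive_digits (digits : List Int) (out : Bool) : Prop := out = filter_consecutive_digits_alt digits
instance (digits : List Int) (out : Bool) : Decidable (Spec_filter_consecutive_digits digits out) := by unfold Spec_filter_consecutive_digits; infer_instance

-- ===== CLAIM (what is proved, stated in full; the proofs are below) =====
def Claim_equal_filter_consecutive_digits : Prop := ∀ (digits : List Int), Dom_filter_consecutive_digits digits → Spec_filter_consecutive_digits digits (filter_consecutive_digits digits)

-- ===== LEMMAS AND PROOFS =====

-- the loop's current_seq, as a recursion over the number of processed iterations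
def pvCur (a : Nat → Bool) : Nat → Int
  | 0 => 1
  | t + 1 => if a t then pvCur a t + 1 else 1

-- the loop's max_seq
def pvMax (a : Nat → Bool) : Nat → Int
  | 0 => 1
  | t + 1 => if a t then max (pvMax a t) (pvCur a t + 1) else pvMax a t

lemma pvCur_pos (a : Nat → Bool) : ∀ t : Nat, 1 ≤ pvCur a t := by
  intro t
  induction t with
  | zero => simp [pvCur]
  | succ t ih => unfold pvCur; split <;> omega

lemma pvCur_ge (a : Nat → Bool) : ∀ t k : Nat,
    ((k : Int) + 1 ≤ pvCur a t ↔ k ≤ t ∧ ∀ j, t - k ≤ j → j < t → a j = true) := by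
  intro t
  induction t with
  | zero =>
    intro k
    simp only [pvCur]
    constructor
    · intro h
      exact ⟨by omega, fun j h1 h2 => absurd h2 (by omega)⟩
    · intro ⟨hk, _⟩
      have : k = 0 := by omega
      omega
  | succ t ih =>
    intro k
    simp only [pvCur]
    by_cases ha : a t = true
    · simp only [ha, if_true]
      cases k with
      | zero =>
        have := pvCur_pos a t
        constructor
        · intro _
          exact ⟨by omega, fun j h1 h2 => absurd h2 (by omega)⟩
        · intro _; omega
      | succ k' =>
        have h := ih k'
        constructor
        · intro h2
          have h3 : (k' : Int) + 1 ≤ pvCur a t := by push_cast at h2 ⊢; omega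
          obtain ⟨hk, hj⟩ := h.mp h3
          refine ⟨by omega, fun j h1 h2 => ?_⟩
          rcases Nat.lt_or_ge j t with hl | hg
          · exact hj j (by omega) hl
          · have hjt : j = t := by omega
            rw [hjt]; exact ha
        · intro ⟨hk, hj⟩
          have h3 : (k' : Int) + 1 ≤ pvCur a t :=
            h.mpr ⟨by omega, fun j h1 h2 => hj j (by omega) (by omega)⟩
          push_cast at h3 ⊢; omega
    · simp only [if_neg ha]
      cases k with
      | zero =>
        constructor
        · intro _
          exact ⟨by omega, fun j h1 h2 => absurd h2 (by omega)⟩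
        · intro _; omega
      | succ k' =>
        constructor
        · intro h2; exfalso; push_cast at h2; omega
        · intro ⟨hk, hj⟩
          exact absurd (hj t (by omega) (by omega)) ha

lemma pvMax_ge (a : Nat → Bool) : ∀ t : Nat,
    ((4 : Int) ≤ pvMax a t ↔ ∃ i, i + 3 ≤ t ∧ a i = true ∧ a (i+1) = true ∧ a (i+2) = true) := by
  intro t
  induction t with
  | zero =>
    simp only [pvMax]
    constructor
    · intro h; omega
    · intro ⟨i, hi, _⟩; omega
  | succ t ih =>
    simp only [pvMax]
    by_cases ha : a t = true
    · simp only [ha, if_true]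
      have hc := pvCur_ge a t 2
      constructor
      · intro h
        rcases le_max_iff.mp h with h1 | h2
        · obtain ⟨i, hi, hw⟩ := ih.mp h1
          exact ⟨i, by omega, hw⟩
        · have h3 : ((2 : Nat) : Int) + 1 ≤ pvCur a t := by push_cast; omega
          obtain ⟨hk, hj⟩ := hc.mp h3
          refine ⟨t - 2, by omega, hj (t-2) (by omega) (by omega), ?_, ?_⟩
          · have e : t - 2 + 1 = t - 1 := by omega
            rw [e]; exact hj (t-1) (by omega) (by omega)
          · have e : t - 2 + 2 = t := by omega
            rw [e]; exact ha
      · intro ⟨i, hi, h1, h2, h3⟩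
        rcases Nat.lt_or_ge (i + 3) (t + 1) with hl | hg
        · exact le_max_iff.mpr (Or.inl (ih.mpr ⟨i, by omega, h1, h2, h3⟩))
        · have hit : i = t - 2 ∧ 2 ≤ t := by omega
          have h4 : ((2 : Nat) : Int) + 1 ≤ pvCur a t := by
            refine hc.mpr ⟨by omega, fun j hj1 hj2 => ?_⟩
            have : j = i ∨ j = i + 1 := by omega
            rcases this with e | e <;> rw [e]
            · exact h1
            · exact h2
          refine le_max_iff.mpr (Or.inr ?_)
          push_cast at h4; omega
    · simp only [if_neg ha]
      constructor
      · intro h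
        obtain ⟨i, hi, hw⟩ := ih.mp h
        exact ⟨i, by omega, hw⟩
      · intro ⟨i, hi, h1, h2, h3⟩
        refine ih.mpr ⟨i, ?_, h1, h2, h3⟩
        by_contra hc2
        have e : i + 2 = t := by omega
        rw [e] at h3
        exact ha h3

lemma fold_eq_pv (l : List Int) : ∀ t : Nat,
    (PySem.List.pyRange 1 (1 + (t : Int)) 1).foldl
      (fun (st : Int × Int) i =>
        if PySem.List.pyGetD l i 0 = PySem.List.pyGetD l (i - 1) 0 + 1 then
          (max st.1 (st.2 + 1), st.2 + 1)
        else (st.1, 1)) (1, 1)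
      = (pvMax (fun j => decide (l.getD (j+1) 0 = l.getD j 0 + 1)) t,
         pvCur (fun j => decide (l.getD (j+1) 0 = l.getD j 0 + 1)) t) := by
  intro t
  induction t with
  | zero =>
    rw [show ((1 : Int) + ((0 : Nat) : Int)) = 1 by norm_num,
        PySem.List.pyRange_one_eq_nil (by omega)]
    simp [pvMax, pvCur]
  | succ t ih =>
    rw [show ((1 : Int) + ((t + 1 : Nat) : Int)) = (1 + (t : Int)) + 1 by push_cast [Nat.cast_add]; ring,
        PySem.List.pyRange_one_succ_right (by omega), List.foldl_append, ih]
    simp only [List.foldl]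
    rw [show (1 + (t : Int)) - 1 = ((t : Nat) : Int) by omega,
        show (1 + (t : Int)) = (((t + 1 : Nat) : Nat) : Int) by omega]
    simp only [PySem.List.pyGetD_natCast]
    simp only [pvMax, pvCur, decide_eq_true_eq]
    split <;> rfl

-- in a strictly increasing Int list, x and x+1 both members sit at adjacent indices
lemma adj_of_mem_succ (l : List Int) (hs : l.Pairwise (· < ·)) {x : Int}
    (hx : x ∈ l) (hy : x + 1 ∈ l) :
    ∃ i : Nat, i + 1 < l.length ∧ l.getD i 0 = x ∧ l.getD (i+1) 0 = x + 1 := by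
  have hmono := List.pairwise_iff_getElem.mp hs
  obtain ⟨i, hi, hxi⟩ := List.mem_iff_getElem.mp hx
  obtain ⟨j, hj, hyj⟩ := List.mem_iff_getElem.mp hy
  have hij : i < j := by
    by_contra hc
    rcases Nat.lt_or_ge j i with hl | hg
    · have := hmono j i hj hi hl
      omega
    · have : i = j := by omega
      subst this; omega
  have hji : j = i + 1 := by
    by_contra hc
    have hlt : i + 1 < j := by omega
    have h1 := hmono i (i+1) hi (by omega) (by omega)
    have h2 := hmono (i+1) j (by omega) hj hlt
    omega
  subst hji
  exact ⟨i, hj, by rw [List.getD_eq_getElem l 0 hi]; exact hxi,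
         by rw [List.getD_eq_getElem l 0 hj]; exact hyj⟩

theorem filter_consecutive_digits_spec : Claim_equal_filter_consecutive_digits := by
  intro digits _
  unfold Spec_filter_consecutive_digits filter_consecutive_digits filter_consecutive_digits_alt
  simp only []
  set S := PySem.Set.ofList digits with hSdef
  set l := PySem.List.sorted S (fun x => x) false with hldef
  have hmem : ∀ x : Int, x ∈ l ↔ x ∈ S := fun x => PySem.List.mem_sorted S (fun x => x) false x
  have hs : l.Pairwise (· < ·) := PySem.List.sorted_ofList_pairwise_lt digits
  rcases hn : l.length with _ | t
  · -- empty list: both sides are false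
    have hle : l = [] := List.eq_nil_of_length_eq_zero hn
    have hSe : S = [] := (PySem.List.sorted_eq_nil_iff S (fun x => x) false).mp hle
    rw [hle, hSe]
    simp [PySem.List.pyRange_one_eq_nil]
  · have hlen : PySem.List.len l = 1 + (t : Int) := by
      simp only [PySem.List.len_eq, hn]; push_cast; ring
    rw [hlen, fold_eq_pv l t]
    rw [Bool.eq_iff_iff]
    set a : Nat → Bool := fun j => decide (l.getD (j+1) 0 = l.getD j 0 + 1) with hadef
    simp only [decide_eq_true_eq, List.any_eq_true, Bool.and_eq_true, PySem.Set.contains,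
      List.contains_iff_mem]
    rw [pvMax_ge a t]
    constructor
    · rintro ⟨i, hi, h1, h2, h3⟩
      have b3 : i + 3 < l.length := by omega
      have e1 : l.getD (i+1) 0 = l.getD i 0 + 1 := by simpa [hadef] using h1
      have e2 : l.getD (i+2) 0 = l.getD (i+1) 0 + 1 := by simpa [hadef] using h2
      have e3 : l.getD (i+3) 0 = l.getD (i+2) 0 + 1 := by simpa [hadef] using h3
      have memi : ∀ j, j < l.length → l.getD j 0 ∈ S := by
        intro j h
        exact (hmem _).mp (by rw [List.getD_eq_getElem l 0 h]; exact List.getElem_mem _)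
      refine ⟨l.getD i 0, memi i (by omega), ⟨?_, ?_⟩, ?_⟩
      · rw [← e1]; exact memi _ (by omega)
      · rw [show l.getD i 0 + 2 = l.getD (i+2) 0 by omega]; exact memi _ (by omega)
      · rw [show l.getD i 0 + 3 = l.getD (i+3) 0 by omega]; exact memi _ b3
    · rintro ⟨d, hd0, ⟨hd1, hd2⟩, hd3⟩
      have hmono := List.pairwise_iff_getElem.mp hs
      have hinj : ∀ p q (hp : p < l.length) (hq : q < l.length), l[p] = l[q] → p = q := by
        intro p q hp hq he
        rcases Nat.lt_trichotomy p q with h | h | h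
        · have := hmono p q hp hq h; omega
        · exact h
        · have := hmono q p hq hp h; omega
      obtain ⟨i1, hb1, hx1, hy1⟩ := adj_of_mem_succ l hs ((hmem d).mpr hd0) ((hmem (d+1)).mpr hd1)
      obtain ⟨i2, hb2, hx2, hy2⟩ := adj_of_mem_succ l hs ((hmem (d+1)).mpr hd1)
        (by rw [show d + 1 + 1 = d + 2 by ring]; exact (hmem (d+2)).mpr hd2)
      obtain ⟨i3, hb3, hx3, hy3⟩ := adj_of_mem_succ l hs ((hmem (d+2)).mpr hd2)
        (by rw [show d + 2 + 1 = d + 3 by ring]; exact (hmem (d+3)).mpr hd3)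
      have e21 : i2 = i1 + 1 := by
        apply hinj i2 (i1+1) (by omega) hb1
        rw [← List.getD_eq_getElem l 0 (by omega), ← List.getD_eq_getElem l 0 hb1, hx2, hy1]
      have e32 : i3 = i2 + 1 := by
        apply hinj i3 (i2+1) (by omega) hb2
        rw [← List.getD_eq_getElem l 0 (by omega), ← List.getD_eq_getElem l 0 hb2, hx3, hy2]
        ring
      refine ⟨i1, by omega, ?_, ?_, ?_⟩
      · simp only [hadef, decide_eq_true_eq]
        rw [hx1, hy1]
      · simp only [hadef, decide_eq_true_eq]
        rw [show i1 + 1 + 1 = i2 + 1 by omega, show i1 + 1 = i2 by omega, hx2, hy2]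
      · simp only [hadef, decide_eq_true_eq]
        rw [show i1 + 2 + 1 = i3 + 1 by omega, show i1 + 2 = i3 by omega, hx3, hy3]
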